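-- pv_equiv track=rewrite | github.com/Ajtiwari26/NukkadMartBackend | app/services/voice_context_service.py | _build_brand_index
-- ===== SOURCE A (Python) =====
-- from typing import Dict, List, Optional
--
-- def _build_brand_index(products: List[Dict]) -> Dict[str, List[str]]:
--     """Build index by brand"""
--     index = {}
--
--     for product in products:
--         brand = product.get('brand', 'Local').lower()
--         if brand not in index:
--             index[brand] = []
--         index[brand].append(product['id'])
--
--     return index
-- ===== SOURCE B (Python) =====
-- from typing import Dict, List
--
-- def _build_brand_index(products: List[Dict]) -> Dict[str, List[str]]:
--     """Build index by brand (key/id lists once, then one filtered pass per distinct brand)"""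
--     keys = [p.get('brand', 'Local').lower() for p in products]
--     ids = [p['id'] for p in products]
--     return {k: [i for kk, i in zip(keys, ids) if kk == k] for k in dict.fromkeys(keys)}
-- ===== Notes on version B (the rewrite author's own statement) =====
-- stated objective: alternative
-- what changed: Replaces the single-pass dict-building loop (membership test, lazy list creation, append) by precomputing the lowercased-brand key list and the id list, then building the result as a comprehension over the deduplicated keys with one filtered zip per distinct brand.
import Mathlib
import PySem

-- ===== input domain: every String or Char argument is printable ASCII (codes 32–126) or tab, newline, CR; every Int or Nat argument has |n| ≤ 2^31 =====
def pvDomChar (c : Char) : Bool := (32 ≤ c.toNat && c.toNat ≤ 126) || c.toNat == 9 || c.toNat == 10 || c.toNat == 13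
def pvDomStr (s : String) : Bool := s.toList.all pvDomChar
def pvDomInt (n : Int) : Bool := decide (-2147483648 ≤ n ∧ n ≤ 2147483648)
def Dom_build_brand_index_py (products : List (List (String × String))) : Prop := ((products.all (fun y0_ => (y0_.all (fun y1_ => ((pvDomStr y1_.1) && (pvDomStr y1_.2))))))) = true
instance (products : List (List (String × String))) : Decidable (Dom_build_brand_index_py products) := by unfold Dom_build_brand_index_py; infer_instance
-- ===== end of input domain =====

-- B replaces A's one-pass dict-building loop by a key/id precomputation and a per-distinct-brand
-- filtered zip (alternative decomposition, no speed claim); return value only, neither mutates input.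

-- shared helpers: `product.get('brand', 'Local').lower()` and `product['id']`
-- (the `.getD ""` in pvIdVal is only reached where Python raises KeyError; Pre_ excludes those inputs)
def pvBrandKey (p : List (String × String)) : String :=
  PySem.Str.lower ((PySem.Dict.mk p).getD "brand" "Local")

def pvIdVal (p : List (String × String)) : String :=
  ((PySem.Dict.mk p).get? "id").getD ""

-- ===== PORT A =====
def build_brand_index_py (products : List (List (String × String))) : List (String × List String) :=
  (products.foldl
    (fun index product =>
      let brand := pvBrandKey product
      let index := if index.contains brand then index else index.insert brand ([] : List String)
      index.modify brand [] (fun l => l ++ [pvIdVal product]))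
    PySem.Dict.empty).items

-- ===== PORT B =====
def build_brand_index_py_alt (products : List (List (String × String))) : List (String × List String) :=
  let keys := products.map pvBrandKey
  let ids := products.map pvIdVal
  (PySem.List.dedup keys).map
    (fun k => (k, ((keys.zip ids).filter (fun q => q.1 == k)).map (fun q => q.2)))

-- ===== PRECONDITION & SPEC =====
-- Pre_ excludes inputs where some product dict lacks the key 'id': there `product['id']` raises
-- KeyError in A (and in B's comprehension alike).
def Pre_build_brand_index_py (products : List (List (String × String))) : Prop :=
  ∀ p ∈ products, "id" ∈ p.map Prod.fst

instance (products : List (List (String × String))) : Decidable (Pre_build_brand_index_py products) := by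
  unfold Pre_build_brand_index_py; infer_instance

def pvWitness_build_brand_index_py : (List (List (String × String))) :=
  [[("id", "1"), ("brand", "Acme")], [("id", "2")]]

def Spec_build_brand_index_py (products : List (List (String × String))) (out : List (String × List String)) : Prop := out = build_brand_index_py_alt products
instance (products : List (List (String × String))) (out : List (String × List String)) : Decidable (Spec_build_brand_index_py products out) := by unfold Spec_build_brand_index_py; infer_instance

-- ===== CLAIM (what is proved, stated in full; the proofs are below) =====
def Claim_equal_build_brand_index_py : Prop := ∀ (products : List (List (String × String))), Dom_build_brand_index_py products → Pre_build_brand_index_py products → Spec_build_brand_index_py products (build_brand_index_py products)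

-- ===== LEMMAS AND PROOFS =====

-- A's loop body ('if brand not in index: index[brand] = []' then append) is one dict modify.
theorem pv_step_eq (d : PySem.Dict String (List String)) (k v : String) :
    (if d.contains k then d else d.insert k ([] : List String)).modify k [] (fun l => l ++ [v])
      = d.modify k [] (fun l => l ++ [v]) := by
  by_cases h : d.contains k = true
  · simp [h]
  · have h' : d.contains k = false := by simpa using h
    simp [h', PySem.Dict.modify, PySem.Dict.getD_insert_self,
      PySem.Dict.insert_insert_self, PySem.Dict.getD_of_not_contains]

theorem pv_foldl_eq (products : List (List (String × String))) :
    products.foldl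
      (fun index product =>
        let brand := pvBrandKey product
        let index := if index.contains brand then index else index.insert brand ([] : List String)
        index.modify brand [] (fun l => l ++ [pvIdVal product]))
      PySem.Dict.empty
    = (products.map (fun p => (pvBrandKey p, pvIdVal p))).foldl
        (fun d q => d.modify q.1 [] (fun l => l ++ [q.2])) PySem.Dict.empty := by
  rw [List.foldl_map]
  apply PySem.List.foldl_congr_mem
  intro d p _
  exact pv_step_eq d (pvBrandKey p) (pvIdVal p)

-- ===== VERDICT (by name: the statement is the Claim_ definition above) =====
theorem build_brand_index_py_spec : Claim_equal_build_brand_index_py := by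
  intro products _ _
  show build_brand_index_py products = build_brand_index_py_alt products
  unfold build_brand_index_py build_brand_index_py_alt
  rw [pv_foldl_eq]
  set l := products.map (fun p => (pvBrandKey p, pvIdVal p)) with hl
  have hnd : ((l.foldl (fun d q => d.modify q.1 [] (fun v => v ++ [q.2])) PySem.Dict.empty)).keys.Nodup := by
    exact PySem.Dict.nodup_keys_foldl_modify_key l Prod.fst [] (fun _ q => (fun v => v ++ [q.2]))
      PySem.Dict.empty (by simp [PySem.Dict.empty, PySem.Dict.keys])
  rw [PySem.Dict.items_eq_map_keys _ hnd ([] : List String)]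
  have hkeys : ((l.foldl (fun d q => d.modify q.1 [] (fun v => v ++ [q.2])) PySem.Dict.empty)).keys
      = PySem.List.dedup (products.map pvBrandKey) := by
    rw [PySem.Dict.keys_foldl_modify_key l Prod.fst [] (fun _ q => (fun v => v ++ [q.2]))]
    simp [PySem.Dict.empty, PySem.Dict.keys, PySem.Set.update_nil_left, hl, List.map_map,
      PySem.List.dedup_eq_ofList, Function.comp_def]
  rw [hkeys]
  show _ = (PySem.List.dedup (products.map pvBrandKey)).map
      (fun k => (k, (((products.map pvBrandKey).zip (products.map pvIdVal)).filter
        (fun q => q.1 == k)).map (fun q => q.2)))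
  rw [List.zip_map']
  refine List.map_congr_left (fun k _ => ?_)
  simp only [hl, PySem.Dict.getD_foldl_modify_append
      (products.map (fun p => (pvBrandKey p, pvIdVal p))) PySem.Dict.empty k,
    PySem.Dict.getD_empty, List.nil_append]
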